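-- pv_equiv track=rewrite | github.com/bucknercd/forge | forge/execution/write_body_sanitize.py | _python_strip_spurious_slash_quotes
-- ===== SOURCE A (Python) =====
-- def _python_strip_spurious_slash_quotes(body: str) -> str:
--     """Same as Go for comments/strings, but use ``#`` line comments (not ``//``)."""
--     out: list[str] = []
--     i = 0
--     n = len(body)
--     state = "code"
--
--     def _starts_triple(idx: int, q: str) -> bool:
--         return idx + 2 < n and body[idx : idx + 3] == q * 3
--
--     while i < n:
--         ch = body[i]
--         if state == "code":
--             if ch == "#":
--                 out.append("#")
--                 i += 1
--                 state = "line"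
--                 continue
--             if ch in "\"'":
--                 quote = ch
--                 if _starts_triple(i, quote):
--                     out.append(quote * 3)
--                     i += 3
--                     state = "tstr_" + quote
--                     continue
--                 out.append(quote)
--                 i += 1
--                 state = "dstr" if quote == '"' else "sstr"
--                 continue
--             if ch == "\\" and i + 1 < n and body[i + 1] in "\"'":
--                 out.append(body[i + 1])
--                 i += 2
--                 continue
--             out.append(ch)
--             i += 1
--             continue
--
--         if state == "line":
--             if ch == "\n":
--                 out.append(ch)
--                 i += 1
--                 state = "code"
--             else:
--                 out.append(ch)
--                 i += 1
--             continue
--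
--         if state in {"dstr", "sstr"}:
--             q = '"' if state == "dstr" else "'"
--             if ch == "\\" and i + 1 < n:
--                 out.append(ch)
--                 out.append(body[i + 1])
--                 i += 2
--                 continue
--             if ch == q:
--                 out.append(q)
--                 i += 1
--                 state = "code"
--                 continue
--             out.append(ch)
--             i += 1
--             continue
--
--         if state == "tstr_\"":
--             if _starts_triple(i, '"'):
--                 out.append('"""')
--                 i += 3
--                 state = "code"
--                 continue
--             if ch == "\\" and i + 1 < n:
--                 out.append(ch)
--                 out.append(body[i + 1])
--                 i += 2
--                 continue
--             out.append(ch)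
--             i += 1
--             continue
--
--         if state == "tstr_'":
--             if _starts_triple(i, "'"):
--                 out.append("'''")
--                 i += 3
--                 state = "code"
--                 continue
--             if ch == "\\" and i + 1 < n:
--                 out.append(ch)
--                 out.append(body[i + 1])
--                 i += 2
--                 continue
--             out.append(ch)
--             i += 1
--             continue
--
--     return "".join(out)
-- ===== SOURCE B (Python) =====
-- def _python_strip_spurious_slash_quotes(body: str) -> str:
--     """Chunk-jumping scanner: copy whole spans (plain code, comments, string
--     literals) in one slice each, dropping the backslash of a code-level
--     escaped quote; no per-character state machine."""
--     out: list[str] = []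
--     i = 0
--     n = len(body)
--     while i < n:
--         j = i
--         while j < n and body[j] not in '#"\'\\':
--             j += 1
--         out.append(body[i:j])
--         if j >= n:
--             break
--         ch = body[j]
--         if ch == '#':
--             k = body.find('\n', j)
--             k = n if k == -1 else k + 1
--             out.append(body[j:k])
--             i = k
--         elif ch == '\\':
--             if j + 1 < n and body[j + 1] in '"\'':
--                 out.append(body[j + 1])
--                 i = j + 2
--             else:
--                 out.append('\\')
--                 i = j + 1
--         elif body[j:j + 3] == ch * 3:
--             k = j + 3
--             while k < n:
--                 if body[k] == '\\' and k + 1 < n: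
--                     k += 2
--                 elif body[k:k + 3] == ch * 3:
--                     k += 3
--                     break
--                 else:
--                     k += 1
--             out.append(body[j:k])
--             i = k
--         else:
--             k = j + 1
--             while k < n:
--                 if body[k] == '\\' and k + 1 < n:
--                     k += 2
--                 elif body[k] == ch:
--                     k += 1
--                     break
--                 else:
--                     k += 1
--             out.append(body[j:k])
--             i = k
--     return ''.join(out)
-- ===== Notes on version B (the rewrite author's own statement) =====
-- stated objective: alternative
-- what changed: Replaced the per-character state-machine loop (a 'state' string dispatched on every char) by a chunk-jumping scanner: plain code spans, whole comments and whole string literals are located and copied as single slices (using str.find and slice comparisons), with only the code-level escaped-quote token rewritten.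
import Mathlib
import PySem

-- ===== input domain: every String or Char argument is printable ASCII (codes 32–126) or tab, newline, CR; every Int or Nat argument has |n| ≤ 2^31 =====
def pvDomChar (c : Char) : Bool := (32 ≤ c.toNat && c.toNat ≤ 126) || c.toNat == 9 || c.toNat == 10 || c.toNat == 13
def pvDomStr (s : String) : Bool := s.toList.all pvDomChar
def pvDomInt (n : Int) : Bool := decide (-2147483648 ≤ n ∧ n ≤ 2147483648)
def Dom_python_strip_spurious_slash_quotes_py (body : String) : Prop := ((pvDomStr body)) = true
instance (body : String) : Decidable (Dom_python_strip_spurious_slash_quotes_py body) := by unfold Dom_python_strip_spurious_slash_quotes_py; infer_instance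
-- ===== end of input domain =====

-- B replaces A's per-character DFA by a chunk-jumping scanner (whole comment/string/plain
-- spans consumed by dedicated scanners); objective: alternative structure, same cost.

-- ===== PORT A =====
-- A's `state` string, as an inductive ("dstr"/"sstr" are `str '"'` / `str '\''`,
-- "tstr_\"" / "tstr_'" are `tstr '"'` / `tstr '\''`).
inductive PvSt where
  | code | line
  | str (q : Char)
  | tstr (q : Char)

-- A's while loop over index i, transcribed as recursion on the remaining characters;
-- `out.append` becomes consing the produced characters in front of the recursive call;
-- lookahead (`body[i+1]`, `_starts_triple`) becomes a match on the tail.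
def pvRunA : List Char → PvSt → List Char
  | [], _ => []
  | c :: rest, .code =>
    if c = '#' then '#' :: pvRunA rest .line
    else if c = '"' ∨ c = '\'' then
      match rest with
      | a :: b :: r2 =>
        if a = c ∧ b = c then c :: c :: c :: pvRunA r2 (.tstr c)
        else c :: pvRunA (a :: b :: r2) (.str c)
      | [a] => c :: pvRunA [a] (.str c)
      | [] => c :: pvRunA ([] : List Char) (.str c)
    else if c = '\\' then
      match rest with
      | d :: r2 => if d = '"' ∨ d = '\'' then d :: pvRunA r2 .code else c :: pvRunA (d :: r2) .code
      | [] => c :: pvRunA ([] : List Char) .code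
    else c :: pvRunA rest .code
  | c :: rest, .line =>
    if c = '\n' then c :: pvRunA rest .code else c :: pvRunA rest .line
  | c :: rest, .str q =>
    match rest with
    | d :: r2 =>
      if c = '\\' then c :: d :: pvRunA r2 (.str q)
      else if c = q then c :: pvRunA (d :: r2) .code
      else c :: pvRunA (d :: r2) (.str q)
    | [] =>
      if c = q then c :: pvRunA ([] : List Char) .code
      else c :: pvRunA ([] : List Char) (.str q)
  | c :: rest, .tstr q =>
    match rest with
    | a :: b :: r2 =>
      if c = q ∧ a = q ∧ b = q then q :: q :: q :: pvRunA r2 .code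
      else if c = '\\' then c :: a :: pvRunA (b :: r2) (.tstr q)
      else c :: pvRunA (a :: b :: r2) (.tstr q)
    | [d] =>
      if c = '\\' then c :: d :: pvRunA ([] : List Char) (.tstr q)
      else c :: pvRunA [d] (.tstr q)
    | [] => c :: pvRunA ([] : List Char) (.tstr q)
termination_by l _ => l.length
decreasing_by all_goals (simp; try omega)

def python_strip_spurious_slash_quotes_py (body : String) : String :=
  String.mk (pvRunA body.toList .code)

-- ===== PORT B =====
-- the characters B's outer jump loop stops at
def pvSpecial (c : Char) : Bool := c = '#' || c = '"' || c = '\'' || c = '\\'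

-- Source B: k = body.find('\n', j); chunk up to and including the newline
def pvScanComment : List Char → List Char × List Char
  | [] => ([], [])
  | c :: rest =>
    if c = '\n' then ([c], rest)
    else ((c :: (pvScanComment rest).1, (pvScanComment rest).2) : List Char × List Char)

-- Source B inner loop closing a one-quote string literal
def pvScanStr (q : Char) : List Char → List Char × List Char
  | [] => ([], [])
  | c :: rest =>
    match rest with
    | d :: r2 =>
      if c = '\\' then (c :: d :: (pvScanStr q r2).1, (pvScanStr q r2).2)
      else if c = q then ([q], d :: r2)
      else (c :: (pvScanStr q (d :: r2)).1, (pvScanStr q (d :: r2)).2)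
    | [] =>
      if c = q then ([q], ([] : List Char))
      else (c :: (pvScanStr q ([] : List Char)).1, (pvScanStr q ([] : List Char)).2)
termination_by l => l.length
decreasing_by all_goals (simp; try omega)

-- Source B inner loop closing a triple-quoted string literal
def pvScanTriple (q : Char) : List Char → List Char × List Char
  | [] => ([], [])
  | c :: rest =>
    match rest with
    | a :: b :: r2 =>
      if c = '\\' then (c :: a :: (pvScanTriple q (b :: r2)).1, (pvScanTriple q (b :: r2)).2)
      else if c = q ∧ a = q ∧ b = q then ([q, q, q], r2)
      else (c :: (pvScanTriple q (a :: b :: r2)).1, (pvScanTriple q (a :: b :: r2)).2)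
    | [d] =>
      if c = '\\' then (c :: d :: (pvScanTriple q ([] : List Char)).1, (pvScanTriple q ([] : List Char)).2)
      else (c :: (pvScanTriple q [d]).1, (pvScanTriple q [d]).2)
    | [] => ([c], ([] : List Char))
termination_by l => l.length
decreasing_by all_goals (simp; try omega)

theorem pvScanComment_len (l : List Char) : (pvScanComment l).2.length ≤ l.length := by
  induction l with
  | nil => simp [pvScanComment]
  | cons c rest ih => simp only [pvScanComment]; split <;> simp <;> omega

theorem pvScanStr_len (q : Char) (l : List Char) : (pvScanStr q l).2.length ≤ l.length := by
  fun_induction pvScanStr q l <;> simp_all <;> omega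

theorem pvScanTriple_len (q : Char) (l : List Char) : (pvScanTriple q l).2.length ≤ l.length := by
  fun_induction pvScanTriple q l <;> simp_all <;> omega

-- Source B's outer while loop: span of plain chars (pvRunB), then dispatch on the
-- special char that stopped the jump (pvRunBStep = the rest of the loop body)
mutual
def pvRunB (l : List Char) : List Char :=
  let s := l.span (fun c => !pvSpecial c)
  s.1 ++ pvRunBStep s.2
termination_by 2 * l.length + 1
decreasing_by
  have := (List.dropWhile_sublist (p := fun c => !pvSpecial c) (l := l)).length_le
  simp [List.span_eq_takeWhile_dropWhile]
  omega
def pvRunBStep : List Char → List Char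
  | [] => []
  | c :: rest =>
    if c = '#' then
      '#' :: ((pvScanComment rest).1 ++ pvRunB (pvScanComment rest).2)
    else if c = '\\' then
      match rest with
      | d :: r2 => if d = '"' ∨ d = '\'' then d :: pvRunB r2 else '\\' :: pvRunB (d :: r2)
      | [] => '\\' :: pvRunB ([] : List Char)
    else
      match rest with
      | a :: b :: r2 =>
        if a = c ∧ b = c then
          c :: c :: c :: ((pvScanTriple c r2).1 ++ pvRunB (pvScanTriple c r2).2)
        else
          c :: ((pvScanStr c (a :: b :: r2)).1 ++ pvRunB (pvScanStr c (a :: b :: r2)).2)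
      | [a] => c :: ((pvScanStr c [a]).1 ++ pvRunB (pvScanStr c [a]).2)
      | [] => c :: ((pvScanStr c ([] : List Char)).1 ++ pvRunB (pvScanStr c ([] : List Char)).2)
termination_by m => 2 * m.length
decreasing_by
  all_goals
    first
      | (have := pvScanComment_len rest; simp only [List.length_cons, List.length_nil] at this ⊢; omega)
      | (have := pvScanTriple_len c r2; simp only [List.length_cons, List.length_nil] at this ⊢; omega)
      | (have := pvScanStr_len c (a :: b :: r2); simp only [List.length_cons, List.length_nil] at this ⊢; omega)
      | (have := pvScanStr_len c [a]; simp only [List.length_cons, List.length_nil] at this ⊢; omega)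
      | (have := pvScanStr_len c ([] : List Char); simp only [List.length_cons, List.length_nil] at this ⊢; omega)
      | (simp only [List.length_cons, List.length_nil] at *; omega)
      | (simp; omega)
end

def python_strip_spurious_slash_quotes_py_alt (body : String) : String :=
  String.mk (pvRunB body.toList)

-- ===== PRECONDITION & SPEC =====
def Spec_python_strip_spurious_slash_quotes_py (body : String) (out : String) : Prop := out = python_strip_spurious_slash_quotes_py_alt body
instance (body : String) (out : String) : Decidable (Spec_python_strip_spurious_slash_quotes_py body out) := by unfold Spec_python_strip_spurious_slash_quotes_py; infer_instance

-- ===== CLAIM (what is proved, stated in full; the proofs are below) =====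
def Claim_equal_python_strip_spurious_slash_quotes_py : Prop := ∀ (body : String), Dom_python_strip_spurious_slash_quotes_py body → Spec_python_strip_spurious_slash_quotes_py body (python_strip_spurious_slash_quotes_py body)

-- ===== LEMMAS AND PROOFS =====

theorem pvLine_eq (l : List Char) :
    pvRunA l .line = (pvScanComment l).1 ++ pvRunA (pvScanComment l).2 .code := by
  induction l with
  | nil => simp [pvRunA, pvScanComment]
  | cons c rest ih =>
    simp only [pvRunA, pvScanComment]
    split <;> simp_all

theorem pvStr_eq (q : Char) (l : List Char) :
    pvRunA l (.str q) = (pvScanStr q l).1 ++ pvRunA (pvScanStr q l).2 .code := by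
  fun_induction pvScanStr q l <;> simp_all [pvRunA]

theorem pvTstr_eq (q : Char) (hq : q ≠ '\\') (l : List Char) :
    pvRunA l (.tstr q) = (pvScanTriple q l).1 ++ pvRunA (pvScanTriple q l).2 .code := by
  have hq' : '\\' ≠ q := Ne.symm hq
  fun_induction pvScanTriple q l <;> (simp only [pvScanTriple]; simp only [pvRunA]) <;> simp_all

theorem pvPlain_eq (plain r : List Char) (h : ∀ c ∈ plain, pvSpecial c = false) :
    pvRunA (plain ++ r) .code = plain ++ pvRunA r .code := by
  induction plain with
  | nil => simp
  | cons c rest ih =>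
    have hc := h c (by simp)
    simp only [pvSpecial, Bool.or_eq_false_iff, decide_eq_false_iff_not] at hc
    obtain ⟨⟨⟨h1, h2⟩, h3⟩, h4⟩ := hc
    have ih' := ih (fun x hx => h x (by simp [hx]))
    simp only [List.cons_append]
    rw [pvRunA.eq_def]
    simp [h1, h2, h3, h4, ih']

theorem pvRunB_nil : pvRunB [] = [] := by
  rw [pvRunB]
  simp [pvRunBStep, List.span_eq_takeWhile_dropWhile]

theorem pvRun_eq (l : List Char) : pvRunA l .code = pvRunB l := by
  induction hn : l.length using Nat.strong_induction_on generalizing l with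
  | _ n ih =>
  subst hn
  rw [pvRunB]
  have hspan : (l.span fun c => !pvSpecial c).1 ++ (l.span fun c => !pvSpecial c).2 = l := by
    simp [List.span_eq_takeWhile_dropWhile]
  have hplain : ∀ c ∈ (l.span fun c => !pvSpecial c).1, pvSpecial c = false := by
    intro c hc
    have := List.mem_takeWhile_imp (by simpa [List.span_eq_takeWhile_dropWhile] using hc)
    simpa using this
  have hslen : (l.span fun c => !pvSpecial c).2.length ≤ l.length := by
    simp only [List.span_eq_takeWhile_dropWhile]
    exact (List.dropWhile_sublist _).length_le
  conv_lhs => rw [← hspan]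
  rw [pvPlain_eq _ _ hplain]
  congr 1
  cases hrem : (l.span fun c => !pvSpecial c).2 with
  | nil => simp [pvRunA, pvRunBStep]
  | cons c rest =>
    rw [pvRunBStep.eq_def]
    have hclen : rest.length < l.length := by
      rw [hrem] at hslen; simp at hslen; omega
    have hcspec : pvSpecial c = true := by
      have hd : (l.span fun c => !pvSpecial c).2 = l.dropWhile fun c => !pvSpecial c := by
        simp [List.span_eq_takeWhile_dropWhile]
      have hrem' : (l.dropWhile fun c => !pvSpecial c) = c :: rest := hd ▸ hrem
      have h2 := List.head_dropWhile_not (p := fun c => !pvSpecial c) (l := l)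
        (by simp [hrem'])
      simp [hrem'] at h2
      simpa using h2
    rw [pvRunA.eq_def]
    by_cases h1 : c = '#'
    · subst h1
      have hlt : (pvScanComment rest).2.length < l.length := by
        have := pvScanComment_len rest; omega
      simp [pvLine_eq, ih _ hlt _ rfl]
    · by_cases h4 : c = '\\'
      · subst h4
        simp only [if_neg h1, if_neg (by decide : ¬('\\' = '"' ∨ '\\' = '\'')), if_pos rfl]
        cases rest with
        | nil => simp [pvRunA, pvRunB_nil]
        | cons d r2 =>
          have hlt2 : r2.length < l.length := by simp at hclen; omega
          by_cases hd : d = '"' ∨ d = '\''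
          · simp [if_pos hd, ih _ hlt2 _ rfl]
          · simp [if_neg hd, ih _ hclen _ rfl]
      · have hquote : c = '"' ∨ c = '\'' := by
          simp only [pvSpecial, Bool.or_eq_true, decide_eq_true_eq] at hcspec
          tauto
        have hqne : c ≠ '\\' := h4
        simp only [if_neg h1, if_pos hquote, if_neg h4]
        cases rest with
        | nil =>
          have hlt : (pvScanStr c ([] : List Char)).2.length < l.length := by
            have h0 := pvScanStr_len c ([] : List Char)
            simp only [List.length_nil, Nat.le_zero] at h0
            simp only [List.length_nil] at hclen
            omega
          simp [pvStr_eq, ih _ hlt _ rfl]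
        | cons a r1 =>
          cases r1 with
          | nil =>
            have hlt : (pvScanStr c [a]).2.length < l.length := by
              have := pvScanStr_len c [a]; simp at this hclen; omega
            simp [pvStr_eq, ih _ hlt _ rfl]
          | cons b r2 =>
            by_cases htrip : a = c ∧ b = c
            · have hlt : (pvScanTriple c r2).2.length < l.length := by
                have := pvScanTriple_len c r2; simp at hclen; omega
              simp [if_pos htrip, pvTstr_eq c hqne, ih _ hlt _ rfl, htrip.1, htrip.2]
            · have hlt : (pvScanStr c (a :: b :: r2)).2.length < l.length := by
                have := pvScanStr_len c (a :: b :: r2); simp at this hclen; omega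
              simp [if_neg htrip, pvStr_eq, ih _ hlt _ rfl]

-- ===== VERDICT (by name: the statement is the Claim_ definition above) =====
theorem python_strip_spurious_slash_quotes_py_spec : Claim_equal_python_strip_spurious_slash_quotes_py := by
  intro body _
  unfold Spec_python_strip_spurious_slash_quotes_py python_strip_spurious_slash_quotes_py python_strip_spurious_slash_quotes_py_alt
  rw [pvRun_eq]
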